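-- pv_equiv track=rewrite | github.com/niwei822/Hackbright-Code-Challenges-book | largest_smaller_than.py | find_largest_smaller_than
-- ===== SOURCE A (Python) =====
-- def find_largest_smaller_than(nums, xnumber):
--     """Find largest number in sorted list that is smaller than given number."""
--     new_nums = []
--     for num in nums:
--         if xnumber < nums[0]:
--             return None
--         if num < xnumber:
--             new_nums.append(num)
--     return len(new_nums) - 1
-- ===== SOURCE B (Python) =====
-- def find_largest_smaller_than(nums, xnumber):
--     """Find largest number in sorted list that is smaller than given number."""
--     if nums and xnumber < nums[0]:
--         return None
--     s = sorted(nums)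
--     lo, hi = 0, len(s)
--     while lo < hi:
--         mid = (lo + hi) // 2
--         if s[mid] < xnumber:
--             lo = mid + 1
--         else:
--             hi = mid
--     return lo - 1
-- ===== Notes on version B (the rewrite author's own statement) =====
-- stated objective: alternative
-- what changed: Replaces A's element-by-element filter-and-append loop (with its per-iteration head check) by a single guard plus a hand-written binary search (bisect_left) on a sorted copy, returning lo - 1 directly.
import Mathlib
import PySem

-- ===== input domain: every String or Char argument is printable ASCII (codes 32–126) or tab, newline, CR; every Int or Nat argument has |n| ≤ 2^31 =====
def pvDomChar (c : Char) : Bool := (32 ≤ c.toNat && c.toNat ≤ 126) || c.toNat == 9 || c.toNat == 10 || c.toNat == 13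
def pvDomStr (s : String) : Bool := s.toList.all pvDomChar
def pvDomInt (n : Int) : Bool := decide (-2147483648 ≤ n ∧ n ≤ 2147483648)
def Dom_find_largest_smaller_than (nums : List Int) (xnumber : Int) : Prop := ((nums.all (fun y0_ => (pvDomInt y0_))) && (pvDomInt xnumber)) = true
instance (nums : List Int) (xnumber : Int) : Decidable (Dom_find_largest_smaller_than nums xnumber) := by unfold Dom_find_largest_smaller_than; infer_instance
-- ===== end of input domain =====

-- B replaces A's linear filter-and-append loop by a guard plus a hand-written binary search on a
-- sorted copy (alternative decomposition; not claimed faster).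
-- ===== PORT A =====
-- the for-loop: per iteration checks xnumber < nums[0] (first), then appends num if num < xnumber
def fltLoop (first xnumber : Int) : List Int → List Int → Option (List Int)
  | [], acc => some acc
  | num :: rest, acc =>
    if xnumber < first then none
    else if num < xnumber then fltLoop first xnumber rest (acc ++ [num])
    else fltLoop first xnumber rest acc

def find_largest_smaller_than (nums : List Int) (xnumber : Int) : Option Int :=
  match fltLoop nums.headI xnumber nums [] with
  | none => none
  | some newNums => some ((newNums.length : Int) - 1)

-- ===== PORT B =====
-- the while-loop of Source B: bisect_left on s, hand-written
def fltBisect (s : List Int) (x : Int) (lo hi : Nat) : Nat :=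
  if h : lo < hi then
    let mid := (lo + hi) / 2
    if s.getD mid 0 < x then fltBisect s x (mid + 1) hi
    else fltBisect s x lo mid
  else lo
termination_by hi - lo
decreasing_by all_goals omega

def find_largest_smaller_than_alt (nums : List Int) (xnumber : Int) : Option Int :=
  if nums ≠ [] ∧ xnumber < nums.headI then none
  else
    let s := PySem.List.sorted nums (fun v => v)
    some ((fltBisect s xnumber 0 s.length : Int) - 1)

-- ===== PRECONDITION & SPEC =====
def Spec_find_largest_smaller_than (nums : List Int) (xnumber : Int) (out : Option Int) : Prop := out = find_largest_smaller_than_alt nums xnumber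
instance (nums : List Int) (xnumber : Int) (out : Option Int) : Decidable (Spec_find_largest_smaller_than nums xnumber out) := by unfold Spec_find_largest_smaller_than; infer_instance

-- ===== CLAIM (what is proved, stated in full; the proofs are below) =====
def Claim_equal_find_largest_smaller_than : Prop := ∀ (nums : List Int) (xnumber : Int), Dom_find_largest_smaller_than nums xnumber → Spec_find_largest_smaller_than nums xnumber (find_largest_smaller_than nums xnumber)

-- ===== LEMMAS AND PROOFS =====

-- A's loop with the early-return guard off: it appends exactly the elements < xnumber
theorem fltLoop_some (first xnumber : Int) (hf : ¬ xnumber < first) :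
    ∀ (l acc : List Int),
      fltLoop first xnumber l acc = some (acc ++ l.filter (fun n => decide (n < xnumber))) := by
  intro l
  induction l with
  | nil => intro acc; simp [fltLoop]
  | cons num rest ih =>
    intro acc
    by_cases hn : num < xnumber
    · simp [fltLoop, hf, hn, ih]
    · simp [fltLoop, hf, hn, ih]

-- boundary characterisation: in a ≤-sorted list, s[i] < x iff i is below the count of elements < x
theorem sorted_lt_iff (s : List Int) (x : Int)
    (hs : List.Pairwise (fun a b => a ≤ b) s) (i : Nat) (hi : i < s.length) :
    (s[i] < x ↔ i < s.countP (fun n => decide (n < x))) := by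
  set p : Int → Bool := fun n => decide (n < x) with hp
  have hmono : ∀ (j k : Nat) (hjk : j ≤ k) (hk : k < s.length), s[j] ≤ s[k] := by
    intro j k hjk hk
    rcases Nat.lt_or_ge j k with h | h
    · exact List.Pairwise.rel_get_of_lt hs (by simpa using h)
    · have : j = k := by omega
      subst this; exact le_refl _
  constructor
  · intro hlt
    have hsplit := List.take_append_drop (i + 1) s
    have : s.countP p = (s.take (i + 1)).countP p + (s.drop (i + 1)).countP p := by
      conv_lhs => rw [← hsplit]
      exact List.countP_append ..
    have htake : (s.take (i + 1)).countP p = (s.take (i + 1)).length := by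
      apply List.countP_eq_length.2
      intro a ha
      rcases List.mem_iff_getElem.1 ha with ⟨j, hj, rfl⟩
      have hjlen : j < s.length := by
        have := List.length_take (l := s) (i := i + 1); omega
      have hji : j ≤ i := by
        have := List.length_take (l := s) (i := i + 1); omega
      have : (s.take (i + 1))[j] = s[j] := List.getElem_take ..
      rw [this]
      have : s[j] ≤ s[i] := hmono j i hji hi
      simp [hp]
      omega
    have hlen : (s.take (i + 1)).length = i + 1 := by
      simp [List.length_take]; omega
    omega
  · intro hcount
    by_contra hge
    push Not at hge
    have hsplit := List.take_append_drop i s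
    have hcnt : s.countP p = (s.take i).countP p + (s.drop i).countP p := by
      conv_lhs => rw [← hsplit]
      exact List.countP_append ..
    have hdrop : (s.drop i).countP p = 0 := by
      apply List.countP_eq_zero.2
      intro a ha
      rcases List.mem_iff_getElem.1 ha with ⟨j, hj, rfl⟩
      have hjlen : i + j < s.length := by
        have := List.length_drop (l := s) (i := i); omega
      have : (s.drop i)[j] = s[i + j] := List.getElem_drop ..
      rw [this]
      have : s[i] ≤ s[i + j] := hmono i (i + j) (by omega) hjlen
      simp [hp]
      omega
    have hle : (s.take i).countP p ≤ (s.take i).length := List.countP_le_length ..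
    have : (s.take i).length ≤ i := by simp [List.length_take]
    omega

-- the binary search converges to the count of elements < x
theorem fltBisect_eq_countP (s : List Int) (x : Int)
    (hs : List.Pairwise (fun a b => a ≤ b) s) :
    ∀ (lo hi : Nat), lo ≤ s.countP (fun n => decide (n < x)) →
      s.countP (fun n => decide (n < x)) ≤ hi → hi ≤ s.length →
      fltBisect s x lo hi = s.countP (fun n => decide (n < x)) := by
  intro lo hi
  induction hgen : hi - lo using Nat.strong_induction_on generalizing lo hi with
  | _ d ih =>
    intro hlo hhi hlen
    rw [fltBisect]
    by_cases h : lo < hi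
    · simp only [h, dif_pos]
      have hmidlt : (lo + hi) / 2 < s.length := by omega
      have hgetD : s.getD ((lo + hi) / 2) 0 = s[(lo + hi) / 2] := List.getD_eq_getElem ..
      have hbound := sorted_lt_iff s x hs ((lo + hi) / 2) hmidlt
      by_cases hm : s.getD ((lo + hi) / 2) 0 < x
      · simp only [hm, if_pos]
        have : (lo + hi) / 2 < s.countP (fun n => decide (n < x)) := by
          apply hbound.1; rw [← hgetD]; exact hm
        exact ih (hi - ((lo + hi) / 2 + 1)) (by omega) _ _ rfl (by omega) hhi hlen
      · simp only [hm, if_neg, not_false_iff]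
        have : ¬ (lo + hi) / 2 < s.countP (fun n => decide (n < x)) := by
          intro hc
          exact hm (by rw [hgetD]; exact hbound.2 hc)
        exact ih ((lo + hi) / 2 - lo) (by omega) _ _ rfl hlo (by omega) (by omega)
    · simp only [h, dif_neg, not_false_iff]
      omega

-- ===== VERDICT (by name: the statement is the Claim_ definition above) =====
theorem find_largest_smaller_than_spec : Claim_equal_find_largest_smaller_than := by
  intro nums xnumber _
  unfold Spec_find_largest_smaller_than find_largest_smaller_than find_largest_smaller_than_alt
  by_cases hg : nums ≠ [] ∧ xnumber < nums.headI
  · rcases hg with ⟨hne, hlt⟩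
    match nums, hne with
    | num :: rest, _ =>
      simp only [List.headI] at hlt ⊢
      simp [fltLoop, hlt]
  · simp only [hg, if_neg, not_false_iff]
    rcases Decidable.em (xnumber < nums.headI) with hlt | hlt
    · have hnil : nums = [] := by
        by_contra hne; exact hg ⟨hne, hlt⟩
      subst hnil
      simp [fltLoop, PySem.List.sorted, fltBisect]
    · rw [fltLoop_some nums.headI xnumber hlt nums []]
      have hs := PySem.List.sorted_pairwise nums (fun v => v)
      have hperm : (PySem.List.sorted nums (fun v => v)).Perm nums :=
        PySem.List.sorted_perm ..
      have hcnt : (PySem.List.sorted nums (fun v => v)).countP (fun n => decide (n < xnumber))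
          = nums.countP (fun n => decide (n < xnumber)) := hperm.countP_eq _
      have hk : nums.countP (fun n => decide (n < xnumber))
          ≤ (PySem.List.sorted nums (fun v => v)).length := by
        rw [← hcnt]; exact List.countP_le_length ..
      rw [fltBisect_eq_countP _ xnumber hs 0 _ (Nat.zero_le _) (by rw [hcnt]; exact hk) (le_refl _)]
      simp [hcnt, List.countP_eq_length_filter]
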